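-- pv_equiv track=rewrite | github.com/mamitiana/window-search-in-a-genome | genome.py | check_position_sequence_in_genome
-- ===== SOURCE A (Python) =====
-- def check_position_sequence_in_genome(genome, seq):
--   """
--   Returns a dictionary containing the start
--   and end of each sequence inside genome.
--   """
--   result = dict()
--
--   for s in seq:
--
--     intermediate_list = []
--
--     for i in range(0, len(genome), 1):
--       if genome[i:len(s) + i] == s:
--         intermediate_list.append((s, i, len(s) + i))
--
--     result[s] = intermediate_list
--
--   return result
-- ===== SOURCE B (Python) =====
-- def check_position_sequence_in_genome(genome, seq):
--   """
--   Returns a dictionary containing the start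
--   and end of each sequence inside genome.
--   """
--   n = len(genome)
--   result = dict()
--   for s in seq:
--     hits = []
--     j = genome.find(s)
--     while j != -1 and j < n:
--       hits.append((s, j, j + len(s)))
--       j = genome.find(s, j + 1)
--     result[s] = hits
--   return result
-- ===== Notes on version B (the rewrite author's own statement) =====
-- stated objective: faster
-- what changed: Instead of slicing and comparing the pattern at every genome index, B uses a str.find-driven skip loop that jumps directly from one occurrence to the next for each pattern.
import Mathlib
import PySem

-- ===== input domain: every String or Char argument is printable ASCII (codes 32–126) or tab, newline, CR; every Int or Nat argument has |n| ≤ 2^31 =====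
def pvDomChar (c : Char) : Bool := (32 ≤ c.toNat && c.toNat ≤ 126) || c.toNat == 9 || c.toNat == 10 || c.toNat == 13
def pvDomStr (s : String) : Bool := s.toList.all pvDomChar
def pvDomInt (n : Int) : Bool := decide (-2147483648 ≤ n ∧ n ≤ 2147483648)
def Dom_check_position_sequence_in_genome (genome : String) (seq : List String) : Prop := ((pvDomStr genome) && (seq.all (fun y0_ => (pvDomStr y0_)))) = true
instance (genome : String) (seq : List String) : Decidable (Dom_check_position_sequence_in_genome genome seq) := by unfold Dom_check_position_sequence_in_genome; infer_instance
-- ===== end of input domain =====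

-- B replaces A's scan of every genome index (a slice comparison at each) by a str.find-driven
-- skip loop per pattern, jumping straight from one occurrence to the next (objective: faster).

-- ===== PORT A =====
def check_position_sequence_in_genome (genome : String) (seq : List String) : List (String × List (String × Int × Int)) :=
  let result : PySem.Dict String (List (String × Int × Int)) := PySem.Dict.empty
  let result := seq.foldl (fun result s =>
    let intermediate : List (String × Int × Int) :=
      (PySem.List.pyRange 0 (PySem.Str.len genome) 1).foldl (fun intermediate i =>
        if PySem.Str.slice genome (some i) (some (PySem.Str.len s + i)) = s then
          intermediate ++ [(s, i, PySem.Str.len s + i)]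
        else intermediate) []
    result.insert s intermediate) result
  result.items

-- ===== PORT B =====
-- the 'while j != -1 and j < n' loop of Source B; fuel n+1 bounds the iteration count (j strictly increases below n)
def pvFindLoopB (genome : String) (s : String) (n : Int) : Nat → Int → List (String × Int × Int)
  | 0, _ => []
  | fuel+1, j =>
    if j ≠ -1 ∧ j < n then
      (s, j, j + PySem.Str.len s) :: pvFindLoopB genome s n fuel (PySem.Str.findFrom genome s (j+1))
    else []

def check_position_sequence_in_genome_alt (genome : String) (seq : List String) : List (String × List (String × Int × Int)) :=
  let n := PySem.Str.len genome
  (seq.foldl (fun result s =>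
      result.insert s (pvFindLoopB genome s n (n.toNat + 1) (PySem.Str.find genome s)))
    (PySem.Dict.empty : PySem.Dict String (List (String × Int × Int)))).items

-- ===== PRECONDITION & SPEC =====
def Spec_check_position_sequence_in_genome (genome : String) (seq : List String) (out : List (String × List (String × Int × Int))) : Prop := out = check_position_sequence_in_genome_alt genome seq
instance (genome : String) (seq : List String) (out : List (String × List (String × Int × Int))) : Decidable (Spec_check_position_sequence_in_genome genome seq out) := by unfold Spec_check_position_sequence_in_genome; infer_instance

-- ===== CLAIM (what is proved, stated in full; the proofs are below) =====
def Claim_equal_check_position_sequence_in_genome : Prop := ∀ (genome : String) (seq : List String), Dom_check_position_sequence_in_genome genome seq → Spec_check_position_sequence_in_genome genome seq (check_position_sequence_in_genome genome seq)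

-- ===== LEMMAS AND PROOFS =====

-- canonical per-pattern occurrence list: matching start positions, in increasing order
def pvOcc (genome s : String) : List (String × Int × Int) :=
  ((List.range genome.toList.length).filter
      (fun i => decide (s.toList <+: genome.toList.drop i))).map
    (fun (i : Nat) => ((s : String), (i : Int), PySem.Str.len s + (i : Int)))

theorem pvSliceCond (genome s : String) (k : Nat) :
    (PySem.Str.slice genome (some ((k:Int))) (some (PySem.Str.len s + ((k:Int)))) = s)
      ↔ s.toList <+: genome.toList.drop k := by
  have hlen : PySem.Str.len s = (s.toList.length : Int) := by simp [PySem.Str.len_eq]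
  have hsl : (PySem.Str.slice genome (some ((k:Int))) (some (PySem.Str.len s + (k:Int)))).toList
      = (genome.toList.drop k).take s.toList.length := by
    rw [PySem.Str.toList_slice, PySem.Chars.slice_eq_listSlice, hlen, add_comm,
      PySem.List.slice_natCast_add]
  constructor
  · intro h
    rw [List.prefix_iff_eq_take]
    have := congrArg String.toList h
    rw [hsl] at this
    exact this.symm
  · intro h
    have h2 : (PySem.Str.slice genome (some ((k:Int))) (some (PySem.Str.len s + (k:Int)))).toList = s.toList := by
      rw [hsl]; exact (List.prefix_iff_eq_take.mp h).symm
    exact String.toList_inj.mp h2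


theorem pvA_inner (genome s : String) :
    (PySem.List.pyRange 0 (PySem.Str.len genome) 1).foldl (fun intermediate i =>
        if PySem.Str.slice genome (some i) (some (PySem.Str.len s + i)) = s then
          intermediate ++ [(s, i, PySem.Str.len s + i)]
        else intermediate) [] = pvOcc genome s := by
  unfold pvOcc
  rw [PySem.List.pyRange_one, List.foldl_map]
  have hn : ((PySem.Str.len genome : Int) - 0).toNat = genome.toList.length := by
    simp [PySem.Str.len_eq]
  rw [hn]
  have hfun : (fun (intermediate : List (String × Int × Int)) (k : Nat) =>
      if PySem.Str.slice genome (some ((0:Int) + k)) (some (PySem.Str.len s + ((0:Int) + k))) = s then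
        intermediate ++ [(s, ((0:Int) + k), PySem.Str.len s + ((0:Int) + k))]
      else intermediate)
      = (fun intermediate k =>
        if (fun i => decide (s.toList <+: genome.toList.drop i)) k = true then
          intermediate ++ [(fun i : Nat => (s, (i : Int), PySem.Str.len s + (i : Int))) k]
        else intermediate) := by
    funext acc k
    simp only [zero_add, decide_eq_true_eq]
    by_cases h : s.toList <+: genome.toList.drop k
    · rw [if_pos ((pvSliceCond genome s k).mpr h), if_pos h]
    · rw [if_neg (fun hc => h ((pvSliceCond genome s k).mp hc)), if_neg h]
  rw [hfun, PySem.List.foldl_append_if, List.nil_append]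

theorem pvFilterRangeSplit (n j : Nat) (Q1 Q2 : Nat → Bool) (hj : j < n) (hQ1j : Q1 j = true)
    (hlow : ∀ i, i < j → Q1 i = false) (hQ2le : ∀ i, i ≤ j → Q2 i = false)
    (hhigh : ∀ i, j < i → Q1 i = Q2 i) :
    (List.range n).filter Q1 = j :: (List.range n).filter Q2 := by
  have hdec : n = (j + 1) + (n - (j + 1)) := by omega
  rw [hdec, List.range_add, List.filter_append, List.filter_append, List.range_succ,
    List.filter_append, List.filter_append]
  have h1 : (List.range j).filter Q1 = [] :=
    List.filter_eq_nil_iff.mpr (fun a ha => by simp [hlow a (List.mem_range.mp ha)])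
  have h2 : (List.range j).filter Q2 = [] :=
    List.filter_eq_nil_iff.mpr (fun a ha => by simp [hQ2le a (Nat.le_of_lt (List.mem_range.mp ha))])
  have h3 : List.filter Q1 [j] = [j] := by simp [hQ1j]
  have h4 : List.filter Q2 [j] = [] := by simp [hQ2le j le_rfl]
  have h5 : (List.map (fun x => j + 1 + x) (List.range (n - (j + 1)))).filter Q1
      = (List.map (fun x => j + 1 + x) (List.range (n - (j + 1)))).filter Q2 := by
    rw [List.filter_map, List.filter_map]
    congr 1
    apply List.filter_congr
    intro a _
    exact hhigh (j + 1 + a) (by omega)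
  rw [h1, h2, h3, h4, h5]
  simp


theorem pvB_loop' (genome s : String) (fuel : Nat) : ∀ (k : Nat),
    k ≤ genome.toList.length → genome.toList.length + 1 - k ≤ fuel →
    pvFindLoopB genome s (PySem.Str.len genome) fuel
        (PySem.Chars.findFrom genome.toList s.toList (k : Int)) =
      ((List.range genome.toList.length).filter
          (fun i => decide (k ≤ i) && decide (s.toList <+: genome.toList.drop i))).map
        (fun (i : Nat) => ((s : String), (i : Int), PySem.Str.len s + (i : Int))) := by
  have hlen : PySem.Str.len genome = (genome.toList.length : Int) := by simp [PySem.Str.len_eq]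
  induction fuel with
  | zero => intro k hk hf; omega
  | succ fuel ih =>
    intro k hk hf
    by_cases hneg : PySem.Chars.findFrom genome.toList s.toList (k : Int) = -1
    · rw [hneg]
      have hnoinf : ¬ s.toList <:+: genome.toList.drop k :=
        (PySem.Chars.findFrom_natCast_eq_neg_one_iff genome.toList s.toList k hk).mp hneg
      have hfil : (List.range genome.toList.length).filter
          (fun i => decide (k ≤ i) && decide (s.toList <+: genome.toList.drop i)) = [] := by
        apply List.filter_eq_nil_iff.mpr
        intro a _
        simp only [Bool.and_eq_true, decide_eq_true_eq, not_and]
        intro hka hpre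
        exact hnoinf (by
          have : genome.toList.drop a = (genome.toList.drop k).drop (a - k) := by
            rw [List.drop_drop]; congr 1; omega
          rw [this] at hpre
          exact hpre.isInfix.trans (List.drop_suffix _ _).isInfix)
      rw [hfil]
      simp [pvFindLoopB]
    · obtain ⟨hge, hpre, hmin⟩ :=
        PySem.Chars.findFrom_natCast_spec genome.toList s.toList k hk hneg
      set j0 : Int := PySem.Chars.findFrom genome.toList s.toList (k : Int) with hj0
      have hj0nn : 0 ≤ j0 := le_trans (by exact_mod_cast Nat.zero_le k) hge
      by_cases hlt : j0 < (genome.toList.length : Int)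
      · have hcond : j0 ≠ -1 ∧ j0 < PySem.Str.len genome := ⟨hneg, by rw [hlen]; simpa using hlt⟩
        rw [show pvFindLoopB genome s (PySem.Str.len genome) (fuel+1) j0 =
          (s, j0, j0 + PySem.Str.len s) ::
            pvFindLoopB genome s (PySem.Str.len genome) fuel
              (PySem.Str.findFrom genome s (j0+1)) from by
            simp only [pvFindLoopB, if_pos hcond]]
        have hcast : j0 + 1 = ((j0.toNat + 1 : Nat) : Int) := by
          push_cast; rw [Int.toNat_of_nonneg hj0nn]
        have hj0lt : j0.toNat < genome.toList.length := by omega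
        rw [PySem.Str.findFrom_eq, hcast, ih (j0.toNat + 1) (by omega) (by omega)]
        have hsplit := pvFilterRangeSplit genome.toList.length j0.toNat
          (fun i => decide (k ≤ i) && decide (s.toList <+: genome.toList.drop i))
          (fun i => decide (j0.toNat + 1 ≤ i) && decide (s.toList <+: genome.toList.drop i))
          hj0lt
          (by simp only [Bool.and_eq_true, decide_eq_true_eq]
              exact ⟨by omega, hpre⟩)
          (by intro i hi
              by_cases hki : k ≤ i
              · have := hmin i hki hi
                simp [this]
              · simp [hki])
          (by intro i hi; simp [show ¬ (j0.toNat + 1 ≤ i) by omega])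
          (by intro i hi
              have h1 : (k ≤ i) := by omega
              have h2 : (j0.toNat + 1 ≤ i) := by omega
              simp [h1, h2])
        rw [hsplit]
        simp only [List.map_cons]
        congr 1
        · have : ((j0.toNat : Nat) : Int) = j0 := Int.toNat_of_nonneg hj0nn
          rw [this]; ring_nf
      · have hcond : ¬ (j0 ≠ -1 ∧ j0 < PySem.Str.len genome) := by
          rw [hlen]; tauto
        rw [show pvFindLoopB genome s (PySem.Str.len genome) (fuel+1) j0 = [] from by
          simp only [pvFindLoopB, if_neg hcond]]
        have hj0ge : genome.toList.length ≤ j0.toNat := by omega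
        symm
        simp only [List.map_eq_nil_iff]
        apply List.filter_eq_nil_iff.mpr
        intro a ha
        simp only [Bool.and_eq_true, decide_eq_true_eq, not_and]
        intro hka hp
        exact hmin a hka (by exact lt_of_lt_of_le (List.mem_range.mp ha) hj0ge) hp

theorem pvB_inner (genome s : String) :
    pvFindLoopB genome s (PySem.Str.len genome) ((PySem.Str.len genome).toNat + 1)
        (PySem.Str.find genome s) = pvOcc genome s := by
  have hfind : PySem.Str.find genome s
      = PySem.Chars.findFrom genome.toList s.toList ((0 : Nat) : Int) := by
    simp [PySem.Str.find_eq]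
  have hlen : (PySem.Str.len genome).toNat = genome.toList.length := by
    simp [PySem.Str.len_eq]
  rw [hfind, hlen, pvB_loop' genome s (genome.toList.length + 1) 0 (Nat.zero_le _) (by omega)]
  unfold pvOcc
  congr 1

-- ===== VERDICT (by name: the statement is the Claim_ definition above) =====
theorem check_position_sequence_in_genome_spec : Claim_equal_check_position_sequence_in_genome := by
  intro genome seq _
  unfold Spec_check_position_sequence_in_genome check_position_sequence_in_genome check_position_sequence_in_genome_alt
  simp only [pvA_inner, pvB_inner]
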